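-- pv_equiv track=rewrite | github.com/henryhshu/CS263-MEDIQA-CORR-2024 | evaluation/evaluate.py | get_nlg_eval_data
-- ===== SOURCE A (Python) =====
-- def get_nlg_eval_data(reference_corrections, candidate_corrections):
--     """Prepare data for NLG metrics."""
--     references = []
--     predictions = []
--
--     counters = {
--         "total_texts": 0,
--         "reference_na": 0,
--         "total_system_texts": 0,
--         "system_provided_na": 0,
--         "system_provided_correct_na": 0,
--     }
--
--     for text_id in reference_corrections:
--         counters["total_texts"] += 1
--         reference_correction = reference_corrections[text_id]
--
--         if reference_correction == "NA":
--             counters["reference_na"] += 1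
--
--         if text_id in candidate_corrections:
--             counters["total_system_texts"] += 1
--             candidate = candidate_corrections[text_id]
--
--             if candidate == "NA":
--                 counters["system_provided_na"] += 1
--
--             if reference_correction == "NA" and candidate == "NA":
--                 counters["system_provided_correct_na"] += 1
--                 continue
--
--             if candidate == "NA" or reference_correction == "NA":
--                 continue
--
--             references.append(reference_correction)
--             predictions.append(candidate)
--
--     return references, predictions, counters
-- ===== SOURCE B (Python) =====
-- def get_nlg_eval_data(reference_corrections, candidate_corrections):
--     """Prepare data for NLG metrics, by divide-and-conquer map-reduce."""
--     items = list(reference_corrections.items())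
--
--     def solve(lo, hi):
--         if hi - lo == 1:
--             tid, ref = items[lo]
--             if tid in candidate_corrections:
--                 cand = candidate_corrections[tid]
--                 keep = ref != "NA" and cand != "NA"
--                 return ([ref] if keep else [], [cand] if keep else [],
--                         (1, int(ref == "NA"), 1, int(cand == "NA"),
--                          int(ref == "NA" and cand == "NA")))
--             return ([], [], (1, int(ref == "NA"), 0, 0, 0))
--         mid = (lo + hi) // 2
--         r1, p1, c1 = solve(lo, mid)
--         r2, p2, c2 = solve(mid, hi)
--         return (r1 + r2, p1 + p2, tuple(x + y for x, y in zip(c1, c2)))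
--
--     if items:
--         references, predictions, (t, rna, ts, sna, scn) = solve(0, len(items))
--     else:
--         references, predictions, (t, rna, ts, sna, scn) = [], [], (0, 0, 0, 0, 0)
--     counters = {
--         "total_texts": t,
--         "reference_na": rna,
--         "total_system_texts": ts,
--         "system_provided_na": sna,
--         "system_provided_correct_na": scn,
--     }
--     return references, predictions, counters
-- ===== Notes on version B (the rewrite author's own statement) =====
-- stated objective: alternative
-- what changed: Replaces A's single left-to-right fused loop with mutable counters and growing lists by a divide-and-conquer map-reduce: the item list is split in halves recursively, each leaf classified independently, and the halves' (references, predictions, counter-tuple) results merged by concatenation and component-wise addition, with the counters dict assembled once at the end; correct because the aggregation is a monoid homomorphism over the ordered item list.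
import Mathlib
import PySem

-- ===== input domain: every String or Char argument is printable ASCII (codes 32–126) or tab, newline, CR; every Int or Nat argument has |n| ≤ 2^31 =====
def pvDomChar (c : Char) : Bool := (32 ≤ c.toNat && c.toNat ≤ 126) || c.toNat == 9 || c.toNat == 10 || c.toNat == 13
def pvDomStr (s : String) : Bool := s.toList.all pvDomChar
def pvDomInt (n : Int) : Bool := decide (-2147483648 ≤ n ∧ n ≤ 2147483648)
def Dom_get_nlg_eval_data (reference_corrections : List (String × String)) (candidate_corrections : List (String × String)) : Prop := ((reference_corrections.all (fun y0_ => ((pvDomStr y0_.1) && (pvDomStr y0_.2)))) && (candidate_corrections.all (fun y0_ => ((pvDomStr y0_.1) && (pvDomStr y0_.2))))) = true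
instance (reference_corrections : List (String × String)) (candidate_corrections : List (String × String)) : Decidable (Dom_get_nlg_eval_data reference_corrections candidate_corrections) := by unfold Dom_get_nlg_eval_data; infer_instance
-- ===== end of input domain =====

-- B replaces A's fused single loop by a divide-and-conquer map-reduce over the item
-- list (halving recursion, results merged by concatenation / component-wise addition);
-- alternative structure, not claimed faster.


-- ===== PORT A =====
-- literal port of A: one fold over the reference dict's items, carrying
-- (references, predictions, counters-dict); `d[k] += 1` is modify (key always present),
-- `reference_corrections[text_id]` / `candidate_corrections[text_id]` are getD (key
-- present at every use, so getD equals Python's raising `[]` here).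
def get_nlg_eval_data (reference_corrections : List (String × String)) (candidate_corrections : List (String × String)) : List String × List String × (List (String × Int)) :=
  let init : PySem.Dict String Int := PySem.Dict.ofList
    [("total_texts", 0), ("reference_na", 0), ("total_system_texts", 0),
     ("system_provided_na", 0), ("system_provided_correct_na", 0)]
  let st := reference_corrections.foldl
    (fun (s : List String × List String × PySem.Dict String Int) p =>
      let text_id := p.1
      let counters := s.2.2.modify "total_texts" 0 (· + 1)
      let reference_correction := (PySem.Dict.mk reference_corrections).getD text_id ""
      let counters := if reference_correction == "NA" then counters.modify "reference_na" 0 (· + 1) else counters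
      if (PySem.Dict.mk candidate_corrections).contains text_id then
        let counters := counters.modify "total_system_texts" 0 (· + 1)
        let candidate := (PySem.Dict.mk candidate_corrections).getD text_id ""
        let counters := if candidate == "NA" then counters.modify "system_provided_na" 0 (· + 1) else counters
        if reference_correction == "NA" && candidate == "NA" then
          (s.1, s.2.1, counters.modify "system_provided_correct_na" 0 (· + 1))
        else if candidate == "NA" || reference_correction == "NA" then
          (s.1, s.2.1, counters)
        else
          (s.1 ++ [reference_correction], s.2.1 ++ [candidate], counters)
      else
        (s.1, s.2.1, counters))
    ([], [], init)
  (st.1, st.2.1, st.2.2.items)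

-- ===== PORT B =====
-- literal port of B's inner `solve(lo, hi)`: recursion on the sublist of items
-- (python indexes `items[lo:hi]`; `mid = (lo+hi)//2` splits off the first
-- `(hi-lo)//2` elements, here `take (length/2)`); the `[]` case is unreachable
-- in python (solve is only called with hi-lo ≥ 1) and only makes the match total.
def solveB (cc : List (String × String)) (l : List (String × String)) : List String × List String × (Int × Int × Int × Int × Int) :=
  match l with
  | [] => ([], [], (0, 0, 0, 0, 0))
  | [p] =>
    if (PySem.Dict.mk cc).contains p.1 then
      let cand := (PySem.Dict.mk cc).getD p.1 ""
      let keep := p.2 != "NA" && cand != "NA"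
      ((if keep then [p.2] else []), (if keep then [cand] else []),
       (1, if p.2 == "NA" then 1 else 0, 1, if cand == "NA" then 1 else 0,
        if p.2 == "NA" && cand == "NA" then 1 else 0))
    else
      ([], [], (1, if p.2 == "NA" then 1 else 0, 0, 0, 0))
  | p :: q :: rest =>
    let l' := p :: q :: rest
    let m := l'.length / 2
    let s1 := solveB cc (l'.take m)
    let s2 := solveB cc (l'.drop m)
    (s1.1 ++ s2.1, s1.2.1 ++ s2.2.1,
     (s1.2.2.1 + s2.2.2.1, s1.2.2.2.1 + s2.2.2.2.1, s1.2.2.2.2.1 + s2.2.2.2.2.1,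
      s1.2.2.2.2.2.1 + s2.2.2.2.2.2.1, s1.2.2.2.2.2.2 + s2.2.2.2.2.2.2))
termination_by l.length
decreasing_by
  · simp [List.length_take]; omega
  · simp [List.length_drop]; omega

-- port of B's outer body: run solve on the whole item list (zeros if empty),
-- then assemble the counters dict from the tuple.
def get_nlg_eval_data_alt (reference_corrections : List (String × String)) (candidate_corrections : List (String × String)) : List String × List String × (List (String × Int)) :=
  let s :=
    if reference_corrections.isEmpty then
      (([] : List String), ([] : List String), ((0 : Int), (0 : Int), (0 : Int), (0 : Int), (0 : Int)))
    else
      solveB candidate_corrections reference_corrections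
  (s.1, s.2.1,
   [("total_texts", s.2.2.1), ("reference_na", s.2.2.2.1),
    ("total_system_texts", s.2.2.2.2.1), ("system_provided_na", s.2.2.2.2.2.1),
    ("system_provided_correct_na", s.2.2.2.2.2.2)])

-- ===== PRECONDITION & SPEC =====
-- Pre_ excludes association lists with duplicate keys: they do not represent any
-- Python dict (A's and B's arguments are dicts, whose keys are necessarily unique).
def Pre_get_nlg_eval_data (reference_corrections : List (String × String)) (candidate_corrections : List (String × String)) : Prop :=
  (reference_corrections.map Prod.fst).Nodup ∧ (candidate_corrections.map Prod.fst).Nodup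
instance (reference_corrections : List (String × String)) (candidate_corrections : List (String × String)) : Decidable (Pre_get_nlg_eval_data reference_corrections candidate_corrections) := by unfold Pre_get_nlg_eval_data; infer_instance
def pvWitness_get_nlg_eval_data : (List (String × String)) × (List (String × String)) :=
  ([("1", "NA"), ("2", "fix a"), ("3", "fix b")], [("2", "fix a"), ("3", "NA")])

def Spec_get_nlg_eval_data (reference_corrections : List (String × String)) (candidate_corrections : List (String × String)) (out : List String × List String × (List (String × Int))) : Prop := out = get_nlg_eval_data_alt reference_corrections candidate_corrections
instance (reference_corrections : List (String × String)) (candidate_corrections : List (String × String)) (out : List String × List String × (List (String × Int))) : Decidable (Spec_get_nlg_eval_data reference_corrections candidate_corrections out) := by unfold Spec_get_nlg_eval_data; infer_instance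

-- ===== CLAIM (what is proved, stated in full; the proofs are below) =====
def Claim_equal_get_nlg_eval_data : Prop := ∀ (reference_corrections : List (String × String)) (candidate_corrections : List (String × String)), Dom_get_nlg_eval_data reference_corrections candidate_corrections → Pre_get_nlg_eval_data reference_corrections candidate_corrections → Spec_get_nlg_eval_data reference_corrections candidate_corrections (get_nlg_eval_data reference_corrections candidate_corrections)

-- ===== LEMMAS AND PROOFS =====

-- the five-counter dict with symbolic values
def cDict (a b c d e : Int) : PySem.Dict String Int :=
  PySem.Dict.mk [("total_texts", a), ("reference_na", b), ("total_system_texts", c),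
                 ("system_provided_na", d), ("system_provided_correct_na", e)]

theorem cDict_m1 (a b c d e : Int) : (cDict a b c d e).modify "total_texts" 0 (· + 1) = cDict (a + 1) b c d e := rfl
theorem cDict_m2 (a b c d e : Int) : (cDict a b c d e).modify "reference_na" 0 (· + 1) = cDict a (b + 1) c d e := rfl
theorem cDict_m3 (a b c d e : Int) : (cDict a b c d e).modify "total_system_texts" 0 (· + 1) = cDict a b (c + 1) d e := rfl
theorem cDict_m4 (a b c d e : Int) : (cDict a b c d e).modify "system_provided_na" 0 (· + 1) = cDict a b c (d + 1) e := rfl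
theorem cDict_m5 (a b c d e : Int) : (cDict a b c d e).modify "system_provided_correct_na" 0 (· + 1) = cDict a b c d (e + 1) := rfl

-- A's loop body once the reference lookup has been replaced by the pair's own value
def stepA (cc : List (String × String)) (s : List String × List String × PySem.Dict String Int) (p : String × String) : List String × List String × PySem.Dict String Int :=
  let counters := s.2.2.modify "total_texts" 0 (· + 1)
  let r := p.2
  let counters := if r == "NA" then counters.modify "reference_na" 0 (· + 1) else counters
  match (PySem.Dict.mk cc).get? p.1 with
  | none => (s.1, s.2.1, counters)
  | some c =>
    let counters := counters.modify "total_system_texts" 0 (· + 1)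
    let counters := if c == "NA" then counters.modify "system_provided_na" 0 (· + 1) else counters
    if r == "NA" && c == "NA" then
      (s.1, s.2.1, counters.modify "system_provided_correct_na" 0 (· + 1))
    else if c == "NA" || r == "NA" then
      (s.1, s.2.1, counters)
    else
      (s.1 ++ [r], s.2.1 ++ [c], counters)

-- the matched pairs, and the kept (both non-"NA") pairs, of a suffix
def pairsB (cc : List (String × String)) (l : List (String × String)) : List (String × String) :=
  l.filterMap (fun p => ((PySem.Dict.mk cc).get? p.1).map (fun c => (p.2, c)))

def keptB (cc : List (String × String)) (l : List (String × String)) : List (String × String) :=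
  (pairsB cc l).filter (fun q => q.1 != "NA" && q.2 != "NA")

theorem loop_spec (cc : List (String × String)) (l : List (String × String))
    (refs preds : List String) (a b c d e : Int) :
    l.foldl (stepA cc) (refs, preds, cDict a b c d e) =
    (refs ++ (keptB cc l).map Prod.fst, preds ++ (keptB cc l).map Prod.snd,
     cDict (a + l.length) (b + ((l.filter (fun p => p.2 == "NA")).length : Int))
       (c + ((pairsB cc l).length : Int))
       (d + (((pairsB cc l).filter (fun q => q.2 == "NA")).length : Int))
       (e + (((pairsB cc l).filter (fun q => q.1 == "NA" && q.2 == "NA")).length : Int))) := by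
  induction l generalizing refs preds a b c d e with
  | nil => simp [keptB, pairsB]
  | cons p t ih =>
    rcases p with ⟨tid, r⟩
    simp only [List.foldl_cons]
    have hstep : stepA cc (refs, preds, cDict a b c d e) (tid, r) =
        match (PySem.Dict.mk cc).get? tid with
        | none =>
          (refs, preds, cDict (a + 1) (if r == "NA" then b + 1 else b) c d e)
        | some cand =>
          if r == "NA" && cand == "NA" then
            (refs, preds, cDict (a + 1) (if r == "NA" then b + 1 else b) (c + 1)
              (if cand == "NA" then d + 1 else d) (e + 1))
          else if cand == "NA" || r == "NA" then
            (refs, preds, cDict (a + 1) (if r == "NA" then b + 1 else b) (c + 1)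
              (if cand == "NA" then d + 1 else d) e)
          else
            (refs ++ [r], preds ++ [cand], cDict (a + 1) (if r == "NA" then b + 1 else b) (c + 1)
              (if cand == "NA" then d + 1 else d) e) := by
      unfold stepA
      rcases hc : (PySem.Dict.mk cc).get? tid with _ | cand <;>
        split_ifs <;>
        simp_all [cDict_m1, cDict_m2, cDict_m3, cDict_m4, cDict_m5]
    rw [hstep]
    rcases hc : (PySem.Dict.mk cc).get? tid with _ | cand
    · rw [ih]
      simp only [keptB, pairsB, List.filterMap_cons, hc, Option.map_none]
      simp only [List.filter_cons]
      by_cases hr : r = "NA" <;>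
        simp [hr, cDict] <;> omega
    · have hpairs : pairsB cc ((tid, r) :: t) = (r, cand) :: pairsB cc t := by
        simp [pairsB, hc]
      by_cases hr : r = "NA" <;> by_cases hcand : cand = "NA"
      · subst hr; subst hcand
        simp only [beq_self_eq_true, Bool.and_self, if_true]
        rw [ih]
        simp [keptB, hpairs, cDict]
        omega
      · subst hr
        have hc2 : (cand == "NA") = false := by simp [hcand]
        simp only [hc2, beq_self_eq_true, Bool.true_and, Bool.or_true,
          Bool.false_eq_true, if_true, if_false]
        rw [ih]
        simp [keptB, hpairs, cDict, hcand]
        omega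
      · subst hcand
        have hr2 : (r == "NA") = false := by simp [hr]
        simp only [hr2, beq_self_eq_true, Bool.false_and, Bool.true_or,
          Bool.false_eq_true, if_true, if_false]
        rw [ih]
        simp [keptB, hpairs, cDict, hr]
        omega
      · have hr2 : (r == "NA") = false := by simp [hr]
        have hc2 : (cand == "NA") = false := by simp [hcand]
        simp only [hr2, hc2, Bool.false_and, Bool.false_or,
          Bool.false_eq_true, if_false]
        rw [ih]
        simp [keptB, hpairs, cDict, hr, hcand]
        omega

-- on Nodup reference keys, A's reference lookup returns the pair's own value
theorem fold_eq_stepA (rc cc : List (String × String))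
    (hnd : (rc.map Prod.fst).Nodup) (s : List String × List String × PySem.Dict String Int) :
    rc.foldl
      (fun (s : List String × List String × PySem.Dict String Int) p =>
        let text_id := p.1
        let counters := s.2.2.modify "total_texts" 0 (· + 1)
        let reference_correction := (PySem.Dict.mk rc).getD text_id ""
        let counters := if reference_correction == "NA" then counters.modify "reference_na" 0 (· + 1) else counters
        if (PySem.Dict.mk cc).contains text_id then
          let counters := counters.modify "total_system_texts" 0 (· + 1)
          let candidate := (PySem.Dict.mk cc).getD text_id ""
          let counters := if candidate == "NA" then counters.modify "system_provided_na" 0 (· + 1) else counters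
          if reference_correction == "NA" && candidate == "NA" then
            (s.1, s.2.1, counters.modify "system_provided_correct_na" 0 (· + 1))
          else if candidate == "NA" || reference_correction == "NA" then
            (s.1, s.2.1, counters)
          else
            (s.1 ++ [reference_correction], s.2.1 ++ [candidate], counters)
        else
          (s.1, s.2.1, counters)) s =
    rc.foldl (stepA cc) s := by
  apply PySem.List.foldl_congr_mem
  intro s p hp
  have hget : (PySem.Dict.mk rc).get? p.1 = some p.2 := by
    apply PySem.Dict.get?_of_mem_items
    · exact hp
    · exact hnd
  have hrefD : (PySem.Dict.mk rc).getD p.1 "" = p.2 :=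
    PySem.Dict.getD_of_get?_eq_some _ "" hget
  unfold stepA
  simp only [hrefD]
  rcases hc : (PySem.Dict.mk cc).get? p.1 with _ | cand
  · have : (PySem.Dict.mk cc).contains p.1 = false := by
      rw [PySem.Dict.contains_eq_isSome_get?, hc]; rfl
    simp [this]
  · have hcon : (PySem.Dict.mk cc).contains p.1 = true := by
      rw [PySem.Dict.contains_eq_isSome_get?, hc]; rfl
    have hcD : (PySem.Dict.mk cc).getD p.1 "" = cand :=
      PySem.Dict.getD_of_get?_eq_some _ "" hc
    simp [hcon, hcD]

-- B's divide-and-conquer computes the same summary as the per-suffix spec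
theorem solveB_spec (cc : List (String × String)) (l : List (String × String)) :
    solveB cc l =
    ((keptB cc l).map Prod.fst, (keptB cc l).map Prod.snd,
     ((l.length : Int), ((l.filter (fun p => p.2 == "NA")).length : Int),
      ((pairsB cc l).length : Int),
      (((pairsB cc l).filter (fun q => q.2 == "NA")).length : Int),
      (((pairsB cc l).filter (fun q => q.1 == "NA" && q.2 == "NA")).length : Int))) := by
  induction l using solveB.induct cc with
  | case1 => simp [solveB, keptB, pairsB]
  | case2 p hcon =>
    rcases hc : (PySem.Dict.mk cc).get? p.1 with _ | cand
    · exact absurd hcon (by rw [PySem.Dict.contains_eq_isSome_get?, hc]; simp)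
    · have hcD : (PySem.Dict.mk cc).getD p.1 "" = cand :=
        PySem.Dict.getD_of_get?_eq_some _ "" hc
      have hpairs : pairsB cc [p] = [(p.2, cand)] := by simp [pairsB, hc]
      rw [solveB]
      by_cases hr : p.2 = "NA" <;> by_cases hcand : cand = "NA" <;>
        simp [hcon, hcD, keptB, hpairs, hr, hcand]
  | case3 p hcon =>
    have hconf : (PySem.Dict.mk cc).contains p.1 = false := by
      cases h : (PySem.Dict.mk cc).contains p.1
      · rfl
      · exact absurd h hcon
    have hc : (PySem.Dict.mk cc).get? p.1 = none := by
      rcases h : (PySem.Dict.mk cc).get? p.1 with _ | cand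
      · rfl
      · exact absurd (show (PySem.Dict.mk cc).contains p.1 = true by
          rw [PySem.Dict.contains_eq_isSome_get?, h]; rfl) (by simp [hconf])
    rw [solveB]
    by_cases hr : p.2 = "NA" <;> simp [hconf, keptB, pairsB, hc, hr]
  | case4 p q rest l' m ih1 ih2 =>
    simp only [solveB]
    rw [show (m : Nat) = (p :: q :: rest).length / 2 from rfl,
        show l' = p :: q :: rest from rfl] at ih1 ih2
    rw [ih1, ih2]
    have hsplit : (p :: q :: rest).take ((p :: q :: rest).length / 2) ++
        (p :: q :: rest).drop ((p :: q :: rest).length / 2) = p :: q :: rest :=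
      List.take_append_drop _ _
    have hkept : ∀ x y : List (String × String),
        keptB cc (x ++ y) = keptB cc x ++ keptB cc y := by
      intro x y; simp [keptB, pairsB, List.filterMap_append, List.filter_append]
    have hpairsapp : ∀ x y : List (String × String),
        pairsB cc (x ++ y) = pairsB cc x ++ pairsB cc y := by
      intro x y; simp [pairsB, List.filterMap_append]
    conv_rhs => rw [← hsplit]
    simp only [hkept, hpairsapp, List.filter_append, List.map_append,
      List.length_append, Nat.cast_add]

-- ===== VERDICT (by name: the statement is the Claim_ definition above) =====
theorem get_nlg_eval_data_spec : Claim_equal_get_nlg_eval_data := by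
  intro rc cc _ hpre
  unfold Spec_get_nlg_eval_data get_nlg_eval_data get_nlg_eval_data_alt
  have hinit : (PySem.Dict.ofList
      [("total_texts", (0 : Int)), ("reference_na", 0), ("total_system_texts", 0),
       ("system_provided_na", 0), ("system_provided_correct_na", 0)]) = cDict 0 0 0 0 0 := rfl
  simp only [hinit]
  rw [fold_eq_stepA rc cc hpre.1, loop_spec, solveB_spec]
  cases rc with
  | nil => simp [keptB, pairsB, cDict]
  | cons p t => simp [cDict]
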